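-- pv_equiv track=rewrite | github.com/lineCode/KlayGE | KlayGE/Core/Src/Base/TableGen/TableGen.py | PrepareOptTable2
-- ===== SOURCE A (Python) =====
-- def PrepareOptTable2(expand):
-- 	size = len(expand)
-- 	o_match = [ [ 0 for i in range(2) ] for j in range(256) ]
-- 	for i in range(256):
-- 		best_err = 256
-- 		for min in range(size):
-- 			for max in range(size):
-- 				combo = (43 * expand[min] + 21 * expand[max] + 32) >> 6;
-- 				err = abs(i - combo);
-- 				if err < best_err:
-- 					o_match[i][0] = min
-- 					o_match[i][1] = max
-- 					best_err = err
-- 	return o_match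
-- ===== SOURCE B (Python) =====
-- def PrepareOptTable2(expand):
--     size = len(expand)
--     # One pass over all (min, max) pairs: record, in scan order, the first pair
--     # reaching each distinct combo value (only combos in [-255, 510] can ever win
--     # for a target i in 0..255, since otherwise the error is >= 256).
--     firsts = []
--     seen = set()
--     for mn in range(size):
--         for mx in range(size):
--             c = (43 * expand[mn] + 21 * expand[mx] + 32) >> 6
--             if -255 <= c <= 510 and c not in seen:
--                 seen.add(c)
--                 firsts.append((c, mn, mx))
--     table = []
--     for i in range(256):
--         best_min = 0
--         best_max = 0
--         best_err = 256
--         for (c, mn, mx) in firsts: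
--             err = abs(i - c)
--             if err < best_err:
--                 best_min = mn
--                 best_max = mx
--                 best_err = err
--         table.append([best_min, best_max])
--     return table
-- ===== Notes on version B (the rewrite author's own statement) =====
-- stated objective: faster
-- what changed: Instead of rescanning all size^2 (min,max) pairs for each of the 256 targets, B enumerates the pairs once, recording the first pair reaching each distinct relevant combo value (at most 766 of them), then resolves all 256 targets against that small table.
import Mathlib
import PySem

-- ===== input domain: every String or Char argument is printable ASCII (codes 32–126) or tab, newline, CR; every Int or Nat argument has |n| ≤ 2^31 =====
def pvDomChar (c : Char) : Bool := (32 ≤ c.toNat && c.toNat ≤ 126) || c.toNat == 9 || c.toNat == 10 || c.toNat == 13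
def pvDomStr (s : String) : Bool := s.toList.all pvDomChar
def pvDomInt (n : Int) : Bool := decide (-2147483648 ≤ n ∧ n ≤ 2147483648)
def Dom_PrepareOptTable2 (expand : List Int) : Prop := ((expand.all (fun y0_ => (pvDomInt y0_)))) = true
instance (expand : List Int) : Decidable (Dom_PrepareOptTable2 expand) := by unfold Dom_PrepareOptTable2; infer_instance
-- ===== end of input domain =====

-- B hoists the 256-target search out of the (min,max) pair enumeration: one pass records the
-- first pair per relevant combo value, then the 256 targets scan that small table (measured faster).

-- ===== PORT A =====
-- indices from range() are always in range, so pyGetD/pySetD are exact here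
def PrepareOptTable2 (expand : List Int) : List (List Int) :=
  let size : Int := (expand.length : Int)
  let o_match : List (List Int) :=
    (PySem.List.pyRange 0 256 1).map (fun _j => (PySem.List.pyRange 0 2 1).map (fun _i => (0 : Int)))
  (PySem.List.pyRange 0 256 1).foldl (fun o_match i =>
    ((PySem.List.pyRange 0 size 1).foldl (fun (st : List (List Int) × Int) mn =>
      (PySem.List.pyRange 0 size 1).foldl (fun (st : List (List Int) × Int) mx =>
        let combo : Int := (43 * PySem.List.pyGetD expand mn 0 + 21 * PySem.List.pyGetD expand mx 0 + 32) >>> (6 : Nat)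
        let err : Int := |i - combo|
        if err < st.2 then
          let om := PySem.List.pySetD st.1 i (PySem.List.pySetD (PySem.List.pyGetD st.1 i []) 0 mn)
          let om := PySem.List.pySetD om i (PySem.List.pySetD (PySem.List.pyGetD om i []) 1 mx)
          (om, err)
        else st) st) (o_match, 256)).1) o_match

-- ===== PORT B =====
def PrepareOptTable2_alt (expand : List Int) : List (List Int) :=
  let size : Int := (expand.length : Int)
  let fs :=
    (PySem.List.pyRange 0 size 1).foldl (fun (st : List (Int × Int × Int) × PySem.Set Int) mn =>
      (PySem.List.pyRange 0 size 1).foldl (fun (st : List (Int × Int × Int) × PySem.Set Int) mx =>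
        let c : Int := (43 * PySem.List.pyGetD expand mn 0 + 21 * PySem.List.pyGetD expand mx 0 + 32) >>> (6 : Nat)
        if -255 ≤ c ∧ c ≤ 510 ∧ ¬ c ∈ st.2 then (st.1 ++ [(c, mn, mx)], st.2.add c) else st) st)
      ([], PySem.Set.ofList [])
  (PySem.List.pyRange 0 256 1).foldl (fun table i =>
    let r := fs.1.foldl (fun (b : Int × Int × Int) (e : Int × Int × Int) =>
      let err : Int := |i - e.1|
      if err < b.2.2 then (e.2.1, e.2.2, err) else b) (0, 0, 256)
    table ++ [[r.1, r.2.1]]) []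

-- ===== PRECONDITION & SPEC =====
def Spec_PrepareOptTable2 (expand : List Int) (out : List (List Int)) : Prop := out = PrepareOptTable2_alt expand
instance (expand : List Int) (out : List (List Int)) : Decidable (Spec_PrepareOptTable2 expand out) := by unfold Spec_PrepareOptTable2; infer_instance

-- ===== CLAIM (what is proved, stated in full; the proofs are below) =====
def Claim_equal_PrepareOptTable2 : Prop := ∀ (expand : List Int), Dom_PrepareOptTable2 expand → Spec_PrepareOptTable2 expand (PrepareOptTable2 expand)

-- ===== LEMMAS AND PROOFS =====

-- the combo value of one (min, max) pair, exactly as both ports compute it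
def pvCombo (expand : List Int) (mn mx : Int) : Int :=
  (43 * PySem.List.pyGetD expand mn 0 + 21 * PySem.List.pyGetD expand mx 0 + 32) >>> (6 : Nat)

-- the pair scan, flattened: (combo, min, max) in A's (and B's) iteration order
def pvScan (expand : List Int) : List (Int × Int × Int) :=
  (PySem.List.pyRange 0 (expand.length : Int) 1).flatMap (fun mn =>
    (PySem.List.pyRange 0 (expand.length : Int) 1).map (fun mx => (pvCombo expand mn mx, mn, mx)))

-- the common selection step: keep the first element reaching a strictly smaller error
def pvSelStep (i : Int) (b : Int × Int × Int) (e : Int × Int × Int) : Int × Int × Int :=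
  let err : Int := |i - e.1|
  if err < b.2.2 then (e.2.1, e.2.2, err) else b

def pvSel (i : Int) (L : List (Int × Int × Int)) : Int × Int × Int :=
  L.foldl (pvSelStep i) (0, 0, 256)

def pvRow (expand : List Int) (i : Int) : List Int :=
  [(pvSel i (pvScan expand)).1, (pvSel i (pvScan expand)).2.1]

-- first occurrences of each relevant combo value, in scan order (what B's firsts list holds)
def pvDedup (seen : List Int) : List (Int × Int × Int) → List (Int × Int × Int)
  | [] => []
  | e :: t =>
      if -255 ≤ e.1 ∧ e.1 ≤ 510 ∧ ¬ e.1 ∈ seen then e :: pvDedup (PySem.Set.add seen e.1) t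
      else pvDedup seen t

-- A's step on one scan element
def pvAStep (i : Int) (st : List (List Int) × Int) (e : Int × Int × Int) : List (List Int) × Int :=
  let err : Int := |i - e.1|
  if err < st.2 then
    let om := PySem.List.pySetD st.1 i (PySem.List.pySetD (PySem.List.pyGetD st.1 i []) 0 e.2.1)
    let om := PySem.List.pySetD om i (PySem.List.pySetD (PySem.List.pyGetD om i []) 1 e.2.2)
    (om, err)
  else st

-- a nested loop over the two index ranges is the fold over the flattened scan
theorem pvScan_foldl {sigma : Type} (expand : List Int) (g : sigma → (Int × Int × Int) → sigma) (st : sigma) :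
    (pvScan expand).foldl g st =
      (PySem.List.pyRange 0 (expand.length : Int) 1).foldl (fun st mn =>
        (PySem.List.pyRange 0 (expand.length : Int) 1).foldl
          (fun st mx => g st (pvCombo expand mn mx, mn, mx)) st) st := by
  simp [pvScan, List.foldl_flatMap, List.foldl_map]

-- A's two element assignments amount to replacing row i by [mn, mx]
theorem pvAStep_update (om : List (List Int)) (i mn mx a b : Int)
    (h0 : 0 ≤ i) (h : i.toNat < om.length) (row : PySem.List.pyGetD om i [] = [a, b]) :
    (PySem.List.pySetD
      (PySem.List.pySetD om i (PySem.List.pySetD (PySem.List.pyGetD om i []) 0 mn)) i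
      (PySem.List.pySetD
        (PySem.List.pyGetD (PySem.List.pySetD om i (PySem.List.pySetD (PySem.List.pyGetD om i []) 0 mn)) i [])
        1 mx)) = om.set i.toNat [mn, mx] := by
  have hlt : i < (om.length : Int) := by omega
  rw [row]
  have h1 : PySem.List.pySetD ([a, b] : List Int) 0 mn = [mn, b] := by
    simp [PySem.List.pySetD, PySem.List.pySet?, PySem.List.pyIdx?]
  simp only [h1, PySem.List.pySetD_of_nonneg _ _ h0]
  have h2 : PySem.List.pyGetD (om.set i.toNat [mn, b]) i [] = [mn, b] := by
    rw [PySem.List.pyGetD_eq_getElem _ _ h0 (by simpa using hlt)]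
    simp [List.getElem_set_self]
  rw [h2]
  have h3 : PySem.List.pySetD ([mn, b] : List Int) 1 mx = [mn, mx] := by
    simp [PySem.List.pySetD, PySem.List.pySet?, PySem.List.pyIdx?]
  rw [h3, List.set_set]

-- A's inner fold tracked against the abstract selection fold
theorem pvInnerA (i : Int) (h0 : 0 ≤ i) :
    ∀ (L : List (Int × Int × Int)) (om : List (List Int)) (p : Int × Int × Int),
      i.toNat < om.length → PySem.List.pyGetD om i [] = [p.1, p.2.1] →
      L.foldl (pvAStep i) (om, p.2.2) =
        (om.set i.toNat [(L.foldl (pvSelStep i) p).1, (L.foldl (pvSelStep i) p).2.1],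
         (L.foldl (pvSelStep i) p).2.2) := by
  intro L
  induction L with
  | nil =>
    intro om p hlen hrow
    simp only [List.foldl_nil]
    have : om.set i.toNat [p.1, p.2.1] = om := by
      have := PySem.List.pyGetD_eq_getElem om ([] : List Int) h0 (by omega)
      rw [this] at hrow
      rw [← hrow]
      exact List.set_getElem_self hlen
    rw [this]
  | cons e t ih =>
    intro om p hlen hrow
    simp only [List.foldl_cons]
    by_cases hc : |i - e.1| < p.2.2
    · have hstep : pvAStep i (om, p.2.2) e = (om.set i.toNat [e.2.1, e.2.2], |i - e.1|) := by
        simp only [pvAStep]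
        rw [if_pos hc]
        rw [pvAStep_update om i e.2.1 e.2.2 p.1 p.2.1 h0 hlen hrow]
      have hsel : pvSelStep i p e = (e.2.1, e.2.2, |i - e.1|) := by
        simp only [pvSelStep]; rw [if_pos hc]
      rw [hstep, hsel]
      have := ih (om.set i.toNat [e.2.1, e.2.2]) (e.2.1, e.2.2, |i - e.1|)
        (by simpa using hlen)
        (by rw [PySem.List.pyGetD_eq_getElem _ _ h0 (by simp; omega)]
            simp [List.getElem_set_self])
      simpa [List.set_set] using this
    · have hstep : pvAStep i (om, p.2.2) e = (om, p.2.2) := by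
        simp only [pvAStep]; rw [if_neg hc]
      have hsel : pvSelStep i p e = p := by
        simp only [pvSelStep]; rw [if_neg hc]
      rw [hstep, hsel]
      exact ih om p hlen hrow

-- B's firsts fold produces exactly the deduplicated scan
theorem pvFirsts (L : List (Int × Int × Int)) :
    ∀ (acc : List (Int × Int × Int)) (seen : PySem.Set Int),
      (L.foldl (fun (st : List (Int × Int × Int) × PySem.Set Int) e =>
        if -255 ≤ e.1 ∧ e.1 ≤ 510 ∧ ¬ e.1 ∈ st.2 then (st.1 ++ [e], st.2.add e.1) else st)
        (acc, seen)).1 = acc ++ pvDedup seen L := by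
  induction L with
  | nil => intro acc seen; simp [pvDedup]
  | cons e t ih =>
    intro acc seen
    simp only [List.foldl_cons, pvDedup]
    by_cases hc : -255 ≤ e.1 ∧ e.1 ≤ 510 ∧ ¬ e.1 ∈ seen
    · rw [if_pos hc, if_pos hc, ih]
      simp
    · rw [if_neg hc, if_neg hc, ih]

-- dropping duplicate and irrelevant combos never changes the selection (0 ≤ i < 256)
theorem pvSel_dedup (i : Int) (h0 : 0 ≤ i) (h1 : i < 256) :
    ∀ (L : List (Int × Int × Int)) (seen : List Int) (st : Int × Int × Int),
      st.2.2 ≤ 256 → (∀ c ∈ seen, st.2.2 ≤ |i - c|) →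
      (pvDedup seen L).foldl (pvSelStep i) st = L.foldl (pvSelStep i) st := by
  intro L
  induction L with
  | nil => intro seen st _ _; simp [pvDedup]
  | cons e t ih =>
    intro seen st hb hseen
    simp only [pvDedup]
    by_cases hc : -255 ≤ e.1 ∧ e.1 ≤ 510 ∧ ¬ e.1 ∈ seen
    · rw [if_pos hc]
      simp only [List.foldl_cons]
      apply ih (PySem.Set.add seen e.1) (pvSelStep i st e)
      · simp only [pvSelStep]
        split
        · next herr => show |i - e.1| ≤ 256; omega
        · exact hb
      · intro c hcmem
        rw [PySem.Set.mem_add] at hcmem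
        simp only [pvSelStep]
        split
        · next herr =>
          rcases hcmem with hcs | rfl
          · show |i - e.1| ≤ |i - c|
            calc |i - e.1| ≤ st.2.2 := le_of_lt herr
              _ ≤ |i - c| := hseen c hcs
          · exact le_refl _
        · next herr =>
          rcases hcmem with hcs | rfl
          · exact hseen c hcs
          · omega
    · rw [if_neg hc]
      have hskip : pvSelStep i st e = st := by
        simp only [pvSelStep]
        rw [if_neg ?_]
        push Not at hc
        rcases abs_cases (i - e.1) with ⟨ha, _⟩ | ⟨ha, _⟩ <;>
        · by_cases hin : e.1 ∈ seen
          · have := hseen e.1 hin; omega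
          · have h255 : e.1 < -255 ∨ 510 < e.1 := by
              by_contra hno; push Not at hno; exact absurd hno.2 (by have := hc hno.1; tauto)
            omega
      rw [List.foldl_cons, hskip]
      exact ih seen st hb hseen

-- A's outer loop, one target row at a time
theorem pvOuterA (expand : List Int) :
    ∀ (k : Nat), k ≤ 256 →
      (PySem.List.pyRange 0 (k : Int) 1).foldl
          (fun om i => ((pvScan expand).foldl (pvAStep i) (om, 256)).1)
          ((List.range 256).map (fun _ => ([0, 0] : List Int)))
        = (List.range 256).map (fun j => if j < k then pvRow expand (j : Int) else [0, 0]) := by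
  intro k
  induction k with
  | zero =>
    intro _
    rw [show ((0 : Nat) : Int) = 0 by norm_num, PySem.List.pyRange_one_eq_nil le_rfl]
    simp only [List.foldl_nil]
    apply List.map_congr_left
    intro a _
    simp
  | succ k ih =>
    intro hk
    rw [show ((k + 1 : Nat) : Int) = (k : Int) + 1 by push_cast; ring,
        PySem.List.pyRange_one_succ_right (by positivity), List.foldl_append, ih (by omega)]
    simp only [List.foldl_cons, List.foldl_nil]
    have hlen : ((k : Int)).toNat < ((List.range 256).map
        (fun j => if j < k then pvRow expand (j : Int) else [0, 0])).length := by
      simp; omega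
    have hrow : PySem.List.pyGetD ((List.range 256).map
        (fun j => if j < k then pvRow expand (j : Int) else [0, 0])) (k : Int) [] =
        [((0 : Int), (0 : Int), (256 : Int)).1, ((0 : Int), (0 : Int), (256 : Int)).2.1] := by
      rw [PySem.List.pyGetD_natCast, PySem.List.getD_map_range _ _ _ _ (by omega)]
      simp
    have h := pvInnerA (k : Int) (by positivity) (pvScan expand)
      ((List.range 256).map (fun j => if j < k then pvRow expand (j : Int) else [0, 0]))
      ((0 : Int), (0 : Int), (256 : Int)) hlen hrow
    have h1 := congrArg Prod.fst h
    simp only [Int.toNat_natCast] at h1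
    rw [h1]
    apply List.ext_getElem
    · simp
    · intro j hj1 hj2
      rw [List.getElem_set]
      simp only [List.getElem_map, List.getElem_range]
      by_cases hkj : k = j
      · subst hkj
        rw [if_pos rfl, if_pos (by omega : k < k + 1)]
        rfl
      · rw [if_neg hkj]
        by_cases hjk : j < k
        · rw [if_pos hjk, if_pos (by omega : j < k + 1)]
        · rw [if_neg hjk, if_neg (by omega : ¬ j < k + 1)]

theorem pvA_eq (expand : List Int) :
    PrepareOptTable2 expand = (List.range 256).map (fun (j : Nat) => pvRow expand ((j : Nat) : Int)) := by
  unfold PrepareOptTable2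
  simp only []
  have hstep : (fun (o_match : List (List Int)) (i : Int) =>
      ((PySem.List.pyRange 0 ((expand.length : Int)) 1).foldl (fun (st : List (List Int) × Int) mn =>
        (PySem.List.pyRange 0 ((expand.length : Int)) 1).foldl (fun (st : List (List Int) × Int) mx =>
          let combo : Int := (43 * PySem.List.pyGetD expand mn 0 + 21 * PySem.List.pyGetD expand mx 0 + 32) >>> (6 : Nat)
          let err : Int := |i - combo|
          if err < st.2 then
            let om := PySem.List.pySetD st.1 i (PySem.List.pySetD (PySem.List.pyGetD st.1 i []) 0 mn)
            let om := PySem.List.pySetD om i (PySem.List.pySetD (PySem.List.pyGetD om i []) 1 mx)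
            (om, err)
          else st) st) (o_match, 256)).1) =
      (fun om i => ((pvScan expand).foldl (pvAStep i) (om, 256)).1) := by
    funext om i
    exact (congrArg Prod.fst (pvScan_foldl expand (pvAStep i) (om, 256))).symm
  rw [hstep]
  have hinit : ((PySem.List.pyRange 0 (256 : Int) 1).map
      (fun _j => (PySem.List.pyRange 0 (2 : Int) 1).map (fun _i => (0 : Int)))) =
      (List.range 256).map (fun _ => ([0, 0] : List Int)) := by
    rw [show ((256 : Int)) = ((256 : Nat) : Int) by norm_num, PySem.List.pyRange_zero_natCast,
        List.map_map]
    apply List.map_congr_left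
    intro a _
    rfl
  rw [hinit]
  have h := pvOuterA expand 256 le_rfl
  rw [show (((256 : Nat)) : Int) = (256 : Int) by norm_num] at h
  rw [h]
  apply List.map_congr_left
  intro j hj
  rw [List.mem_range] at hj
  rw [if_pos hj]

set_option maxRecDepth 8192 in
theorem pvB_eq (expand : List Int) :
    PrepareOptTable2_alt expand =
      (List.range 256).map (fun (j : Nat) =>
        [(pvSel ((j : Nat) : Int) (pvDedup [] (pvScan expand))).1,
         (pvSel ((j : Nat) : Int) (pvDedup [] (pvScan expand))).2.1]) := by
  unfold PrepareOptTable2_alt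
  simp only []
  have hfs :
      ((PySem.List.pyRange 0 (expand.length : Int) 1).foldl (fun (st : List (Int × Int × Int) × PySem.Set Int) mn =>
        (PySem.List.pyRange 0 (expand.length : Int) 1).foldl (fun (st : List (Int × Int × Int) × PySem.Set Int) mx =>
          let c : Int := (43 * PySem.List.pyGetD expand mn 0 + 21 * PySem.List.pyGetD expand mx 0 + 32) >>> (6 : Nat)
          if -255 ≤ c ∧ c ≤ 510 ∧ ¬ c ∈ st.2 then (st.1 ++ [(c, mn, mx)], st.2.add c) else st) st)
        ([], PySem.Set.ofList [])).1 = pvDedup [] (pvScan expand) := by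
    exact ((congrArg Prod.fst (pvScan_foldl expand
      (fun (st : List (Int × Int × Int) × PySem.Set Int) (e : Int × Int × Int) =>
        if -255 ≤ e.1 ∧ e.1 ≤ 510 ∧ ¬ e.1 ∈ st.2 then (st.1 ++ [e], st.2.add e.1) else st)
      ([], PySem.Set.ofList []))).symm).trans (pvFirsts (pvScan expand) [] (PySem.Set.ofList []))
  rw [hfs]
  have hr : PySem.List.pyRange 0 (256 : Int) 1 = (List.range 256).map (fun k => (k : Int)) := by
    rw [show ((256 : Int)) = ((256 : Nat) : Int) by norm_num]
    exact PySem.List.pyRange_zero_natCast 256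
  rw [hr]
  refine (PySem.List.foldl_append_singleton_eq_map
    (fun i : Int => [(pvSel i (pvDedup [] (pvScan expand))).1, (pvSel i (pvDedup [] (pvScan expand))).2.1])
    ((List.range 256).map (fun k => (k : Int))) []).trans ?_
  simp only [List.map_map]
  rfl

-- ===== VERDICT (by name: the statement is the Claim_ definition above) =====
theorem PrepareOptTable2_spec : Claim_equal_PrepareOptTable2 := by
  intro expand _
  unfold Spec_PrepareOptTable2
  rw [pvA_eq, pvB_eq]
  apply List.map_congr_left
  intro j hj
  rw [List.mem_range] at hj
  have h0 : (0 : Int) ≤ (j : Int) := by positivity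
  have h1 : ((j : Int)) < 256 := by exact_mod_cast hj
  unfold pvRow pvSel
  rw [pvSel_dedup (j : Int) h0 h1 (pvScan expand) [] (0, 0, 256) (by norm_num) (by simp)]
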